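-- pv_equiv track=rewrite | github.com/CSStudySession/AlgoInPython | Meta/Meta_minium_number_of_monotonic_array.py | count_monotonic_subarrays
-- ===== SOURCE A (Python) =====
-- def count_monotonic_subarrays(nums: list[int]) -> int:
--     if not nums:
--         return 0
--     increasing = None  # 当前趋势：None / True(上升) / False(下降)
--     cnt = 0
--     for i in range(1, len(nums)):
--         if nums[i] > nums[i - 1]:
--             if increasing is None or increasing is False:
--                 increasing = True
--                 cnt += 1
--         elif nums[i] < nums[i - 1]:
--             if increasing is None or increasing is True:
--                 increasing = False
--                 cnt += 1
--         # 若相等，则忽略，保持当前趋势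
--     return cnt
-- ===== SOURCE B (Python) =====
-- def count_monotonic_subarrays(nums: list[int]) -> int:
--     # collapse adjacent duplicates, then count local extrema among consecutive triples
--     d = []
--     for v in nums:
--         if not d or d[-1] != v:
--             d.append(v)
--     if len(d) < 2:
--         return 0
--     return 1 + sum(1 for a, b, c in zip(d, d[1:], d[2:])
--                    if a < b > c or a > b < c)
-- ===== Notes on version B (the rewrite author's own statement) =====
-- stated objective: alternative
-- what changed: Instead of A's stateful trend-tracking scan, B first collapses adjacent duplicates into d, then returns 0 if len(d)<2 and otherwise 1 plus the number of strict local extrema (peaks/valleys) among consecutive triples of d.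
import Mathlib
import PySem

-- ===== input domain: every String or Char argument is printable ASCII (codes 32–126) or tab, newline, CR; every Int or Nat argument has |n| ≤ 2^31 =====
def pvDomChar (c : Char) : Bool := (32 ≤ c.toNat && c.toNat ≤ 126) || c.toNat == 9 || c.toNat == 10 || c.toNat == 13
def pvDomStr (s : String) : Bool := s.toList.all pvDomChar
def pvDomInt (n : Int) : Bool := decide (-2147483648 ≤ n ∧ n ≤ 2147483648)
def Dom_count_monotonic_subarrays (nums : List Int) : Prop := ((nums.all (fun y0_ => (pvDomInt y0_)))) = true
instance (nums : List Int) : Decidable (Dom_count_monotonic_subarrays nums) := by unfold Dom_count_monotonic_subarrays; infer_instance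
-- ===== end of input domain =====

-- B replaces A's stateful trend-tracking scan by: collapse adjacent duplicates, then 1 + the number of strict local extrema among consecutive triples; alternative decomposition, same cost.

-- ===== PORT A =====
-- loop body of A's 'for i in range(1, len(nums))'
def pvStepA (nums : List Int) (st : Option Bool × Int) (i : Int) : Option Bool × Int :=
  if PySem.List.pyGetD nums i 0 > PySem.List.pyGetD nums (i - 1) 0 then
    if st.1 = none ∨ st.1 = some false then (some true, st.2 + 1) else st
  else if PySem.List.pyGetD nums i 0 < PySem.List.pyGetD nums (i - 1) 0 then
    if st.1 = none ∨ st.1 = some true then (some false, st.2 + 1) else st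
  else st

def count_monotonic_subarrays (nums : List Int) : Int :=
  if nums = [] then 0
  else ((PySem.List.pyRange 1 (nums.length : Int) 1).foldl (pvStepA nums) (none, 0)).2

-- ===== PORT B =====
-- body of B's dedup loop: append v unless it equals the last kept element
def pvDedupStep (d : List Int) (v : Int) : List Int :=
  if d = [] ∨ d.getLast? ≠ some v then d ++ [v] else d

-- predicate of B's generator: (a, (b, c)) is a strict local extremum
def pvExtP (p : Int × Int × Int) : Bool :=
  decide ((p.1 < p.2.1 ∧ p.2.1 > p.2.2) ∨ (p.1 > p.2.1 ∧ p.2.1 < p.2.2))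

def count_monotonic_subarrays_alt (nums : List Int) : Int :=
  let d := nums.foldl pvDedupStep []
  if d.length < 2 then 0
  else 1 + ((d.zip ((d.drop 1).zip (d.drop 2))).countP pvExtP : Int)

-- ===== PRECONDITION & SPEC =====
def Spec_count_monotonic_subarrays (nums : List Int) (out : Int) : Prop := out = count_monotonic_subarrays_alt nums
instance (nums : List Int) (out : Int) : Decidable (Spec_count_monotonic_subarrays nums out) := by unfold Spec_count_monotonic_subarrays; infer_instance

-- ===== CLAIM =====
def Claim_equal_count_monotonic_subarrays : Prop := ∀ (nums : List Int), Dom_count_monotonic_subarrays nums → Spec_count_monotonic_subarrays nums (count_monotonic_subarrays nums)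

-- ===== LEMMAS AND PROOFS =====

-- A's loop body seen on adjacent elements (prev, c) instead of indices
def pvStepA' (prev c : Int) (st : Option Bool × Int) : Option Bool × Int :=
  if c > prev then
    if st.1 = none ∨ st.1 = some false then (some true, st.2 + 1) else st
  else if c < prev then
    if st.1 = none ∨ st.1 = some true then (some false, st.2 + 1) else st
  else st

-- A's loop as structural recursion over the list
def pvLoopA (prev : Int) (rest : List Int) (st : Option Bool × Int) : Option Bool × Int :=
  match rest with
  | [] => st
  | c :: cs => pvLoopA c cs (pvStepA' prev c st)

lemma pvStepA_eq (pre : List Int) (prev c : Int) (cs : List Int) (st : Option Bool × Int) :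
    pvStepA (pre ++ prev :: c :: cs) st ((pre.length : Int) + 1) = pvStepA' prev c st := by
  have hb : (pre.length : Int) + 1 < (((pre ++ prev :: c :: cs).length : Nat) : Int) := by simp
  have h1 : PySem.List.pyGetD (pre ++ prev :: c :: cs) ((pre.length : Int) + 1) 0 = c := by
    rw [PySem.List.pyGetD_eq_getElem _ _ (by omega) hb]
    have ht : ((pre.length : Int) + 1).toNat = pre.length + 1 := by omega
    simp [ht, List.getElem_append_right]
  simp [pvStepA, pvStepA', h1]

lemma pvLoopA_eq (rest : List Int) : ∀ (pre : List Int) (prev : Int) (st : Option Bool × Int),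
    (PySem.List.pyRange ((pre.length : Int) + 1) ((pre.length : Int) + 1 + rest.length) 1).foldl
      (pvStepA (pre ++ prev :: rest)) st = pvLoopA prev rest st := by
  induction rest with
  | nil =>
    intro pre prev st
    simp [PySem.List.pyRange_one_eq_nil, pvLoopA]
  | cons c cs ih =>
    intro pre prev st
    have hlt : (pre.length : Int) + 1 < (pre.length : Int) + 1 + ((c :: cs).length : Nat) := by
      simp
    rw [PySem.List.pyRange_one_cons hlt, List.foldl_cons, pvStepA_eq]
    have harr : pre ++ prev :: c :: cs = (pre ++ [prev]) ++ c :: cs := by simp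
    have e1 : (pre.length : Int) + 1 + 1 = (((pre ++ [prev]).length : Nat) : Int) + 1 := by
      simp
    have e2 : (pre.length : Int) + 1 + (((c :: cs).length : Nat) : Int) =
        (((pre ++ [prev]).length : Nat) : Int) + 1 + ((cs.length : Nat) : Int) := by
      simp; ring
    rw [harr, e1, e2, ih (pre ++ [prev]) c (pvStepA' prev c st)]
    simp [pvLoopA]

-- structural characterization of B's dedup loop tail
def pvTailDedup (prev : Int) : List Int → List Int
  | [] => []
  | v :: vs => if v = prev then pvTailDedup prev vs else v :: pvTailDedup v vs

lemma pvDedup_foldl (l : List Int) : ∀ (pre : List Int) (x : Int),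
    l.foldl pvDedupStep (pre ++ [x]) = pre ++ x :: pvTailDedup x l := by
  induction l with
  | nil => intro pre x; simp [pvTailDedup]
  | cons v vs ih =>
    intro pre x
    by_cases h : v = x
    · have hstep : pvDedupStep (pre ++ [x]) v = pre ++ [x] := by
        simp [pvDedupStep, h]
      simp only [List.foldl_cons, hstep, ih, pvTailDedup, if_pos h]
    · have hstep : pvDedupStep (pre ++ [x]) v = (pre ++ [x]) ++ [v] := by
        simp [pvDedupStep, Ne.symm h]
      simp only [List.foldl_cons, hstep, pvTailDedup, if_neg h]
      have := ih (pre ++ [x]) v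
      simpa using this

lemma pvDedup_spec (x : Int) (rest : List Int) :
    (x :: rest).foldl pvDedupStep [] = x :: pvTailDedup x rest := by
  have h0 : pvDedupStep [] x = [] ++ [x] := by simp [pvDedupStep]
  rw [List.foldl_cons, h0, pvDedup_foldl rest [] x]
  simp

lemma pvTailDedup_chain (l : List Int) : ∀ (x : Int),
    List.IsChain (fun a b => a ≠ b) (x :: pvTailDedup x l) := by
  induction l with
  | nil => intro x; simp [pvTailDedup]
  | cons v vs ih =>
    intro x
    by_cases h : v = x
    · simpa [pvTailDedup, h] using ih x
    · simp only [pvTailDedup, if_neg h]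
      exact List.isChain_cons_cons.mpr ⟨fun hx => h hx.symm, ih v⟩

-- A's loop ignores adjacent duplicates
lemma pvLoopA_dedup (l : List Int) : ∀ (prev : Int) (st : Option Bool × Int),
    pvLoopA prev l st = pvLoopA prev (pvTailDedup prev l) st := by
  induction l with
  | nil => intro prev st; simp [pvTailDedup]
  | cons c cs ih =>
    intro prev st
    by_cases h : c = prev
    · have hstep : pvStepA' prev c st = st := by simp [pvStepA', h]
      simp only [pvLoopA, hstep, pvTailDedup, if_pos h]
      rw [h, ih]
    · simp only [pvLoopA, pvTailDedup, if_neg h, ih]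

-- recursive extremum count over consecutive triples
def pvExtRec (a b : Int) : List Int → Int
  | [] => 0
  | c :: cs => (if (a < b ∧ b > c) ∨ (a > b ∧ b < c) then 1 else 0) + pvExtRec b c cs

-- A's running count after the trend is established equals the extremum count
lemma pvLoopA_ext (cs : List Int) : ∀ (a b : Int) (cnt : Int), a ≠ b →
    List.IsChain (fun x y => x ≠ y) (b :: cs) →
    (pvLoopA b cs (some (decide (a < b)), cnt)).2 = cnt + pvExtRec a b cs := by
  induction cs with
  | nil => intro a b cnt _ _; simp [pvLoopA, pvExtRec]
  | cons c cs ih =>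
    intro a b cnt hab hch
    have hbc : b ≠ c := (List.isChain_cons_cons.mp hch).1
    have hch' : List.IsChain (fun x y => x ≠ y) (c :: cs) := List.IsChain.of_cons hch
    rcases lt_trichotomy b c with h | h | h
    · -- rising step
      have hstep : pvStepA' b c (some (decide (a < b)), cnt) =
          (some (decide (b < c)), cnt + if a > b ∧ b < c then 1 else 0) := by
        rcases lt_or_gt_of_ne hab with ha | ha
        · simp [pvStepA', h, ha, not_lt.mpr (le_of_lt ha)]
        · simp [pvStepA', h, ha, not_lt.mpr (le_of_lt ha)]
      simp only [pvLoopA, hstep]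
      rw [ih b c _ hbc hch']
      have hnot : ¬ (a < b ∧ b > c) := fun ⟨_, hb⟩ => absurd h (not_lt.mpr (le_of_lt hb))
      simp only [pvExtRec, hnot, false_or]
      ring
    · exact absurd h hbc
    · -- falling step
      have hstep : pvStepA' b c (some (decide (a < b)), cnt) =
          (some (decide (b < c)), cnt + if a < b ∧ b > c then 1 else 0) := by
        rcases lt_or_gt_of_ne hab with ha | ha
        · simp [pvStepA', ha, not_lt.mpr (le_of_lt h), h]
        · simp [pvStepA', not_lt.mpr (le_of_lt h), h, not_lt.mpr (le_of_lt ha)]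
      simp only [pvLoopA, hstep]
      rw [ih b c _ hbc hch']
      have hnot : ¬ (a > b ∧ b < c) := fun ⟨_, hb⟩ => absurd h (not_lt.mpr (le_of_lt hb))
      simp only [pvExtRec, hnot, or_false]
      ring

-- the triple-zip countP of B equals the recursive extremum count
lemma pvExtRec_countP (cs : List Int) : ∀ (a b : Int),
    pvExtRec a b cs =
      (((a :: b :: cs).zip (((a :: b :: cs).drop 1).zip ((a :: b :: cs).drop 2))).countP pvExtP : Int) := by
  induction cs with
  | nil => intro a b; simp [pvExtRec]
  | cons c cs ih =>
    intro a b
    have := ih b c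
    simp only [pvExtRec, List.drop, List.zip_cons_cons, List.countP_cons]
    rw [this]
    by_cases h : (a < b ∧ b > c) ∨ (a > b ∧ b < c)
    · simp only [pvExtP, h]
      simp [List.drop]
      ring
    · simp only [pvExtP, h]
      simp [List.drop]

-- ===== VERDICT =====
theorem count_monotonic_subarrays_spec : Claim_equal_count_monotonic_subarrays := by
  intro nums _
  unfold Spec_count_monotonic_subarrays
  cases nums with
  | nil => rfl
  | cons x rest =>
    unfold count_monotonic_subarrays count_monotonic_subarrays_alt
    have h0 := pvLoopA_eq rest [] x (none, 0)
    simp only [List.length_nil, Nat.cast_zero, zero_add, List.nil_append] at h0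
    have hlen : ((x :: rest).length : Int) = 1 + rest.length := by simp; omega
    simp only [List.cons_ne_nil, reduceIte, hlen, h0]
    rw [pvLoopA_dedup, pvDedup_spec]
    cases ht : pvTailDedup x rest with
    | nil => simp [pvLoopA]
    | cons b cs =>
      have hch : List.IsChain (fun a b => a ≠ b) (x :: b :: cs) := ht ▸ pvTailDedup_chain rest x
      have hxb : x ≠ b := (List.isChain_cons_cons.mp hch).1
      have hch' : List.IsChain (fun a b => a ≠ b) (b :: cs) := List.isChain_of_isChain_cons hch
      have hstep : pvStepA' x b (none, 0) = (some (decide (x < b)), 1) := by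
        rcases lt_or_gt_of_ne hxb with h | h
        · simp [pvStepA', h]
        · simp [pvStepA', h, not_lt.mpr (le_of_lt h)]
      simp only [pvLoopA, hstep]
      rw [pvLoopA_ext cs x b 1 hxb hch']
      have hlen2 : ¬ (x :: b :: cs).length < 2 := by simp
      simp only [hlen2, reduceIte]
      rw [pvExtRec_countP cs x b]
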